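-- pv_equiv track=rewrite | github.com/ZamAI-ORG/zamai-models | fix_spaces_zerogpu.py | fix_app_py_content
-- ===== SOURCE A (Python) =====
-- def fix_app_py_content(content, has_spaces_import, has_gpu_decorator):
--     """Fix app.py content for ZeroGPU support"""
--     lines = content.split('\n')
--     fixed_lines = []
--
--     # Add spaces import if missing
--     if not has_spaces_import:
--         # Add after other imports
--         import_added = False
--         for i, line in enumerate(lines):
--             fixed_lines.append(line)
--             if line.strip().startswith('import ') or line.strip().startswith('from '):
--                 # Add spaces import after the last import
--                 if i + 1 >= len(lines) or not (lines[i + 1].strip().startswith('import ') or lines[i + 1].strip().startswith('from ')):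
--                     if not import_added:
--                         fixed_lines.append('import spaces')
--                         import_added = True
--
--         if not import_added:
--             # If no imports found, add at the beginning
--             fixed_lines.insert(0, 'import spaces')
--
--         lines = fixed_lines
--         fixed_lines = []
--
--     # Add @spaces.GPU decorator if missing
--     if not has_gpu_decorator:
--         for i, line in enumerate(lines):
--             # Look for function definitions that might need GPU
--             if line.strip().startswith('def ') and ('predict' in line or 'generate' in line or 'inference' in line or 'process' in line):
--                 fixed_lines.append('@spaces.GPU')
--                 fixed_lines.append(line)
--             else:
--                 fixed_lines.append(line)
--     else:
--         fixed_lines = lines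
--
--     return '\n'.join(fixed_lines)
-- ===== SOURCE B (Python) =====
-- def _is_import(line):
--     s = line.strip()
--     return s.startswith('import ') or s.startswith('from ')
--
--
-- def fix_app_py_content(content, has_spaces_import, has_gpu_decorator):
--     """Fix app.py content for ZeroGPU support (single fused pass)."""
--     lines = content.split('\n')
--     out = []
--     import_done = False
--     for i, line in enumerate(lines):
--         if not has_gpu_decorator and line.strip().startswith('def ') and (
--                 'predict' in line or 'generate' in line or 'inference' in line or 'process' in line):
--             out.append('@spaces.GPU')
--         out.append(line)
--         if (not has_spaces_import) and not import_done and _is_import(line) and (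
--                 i + 1 >= len(lines) or not _is_import(lines[i + 1])):
--             out.append('import spaces')
--             import_done = True
--     if not has_spaces_import and not import_done:
--         out.insert(0, 'import spaces')
--     return '\n'.join(out)
-- ===== Notes on version B (the rewrite author's own statement) =====
-- stated objective: alternative
-- what changed: Replaces A's two sequential rebuild passes (insert import after first import run, then re-scan the whole rebuilt list for def lines) with one fused linear pass over the original lines that emits decorator, line and the once-only import in a single traversal, with the same position-0 fallback.
import Mathlib
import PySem

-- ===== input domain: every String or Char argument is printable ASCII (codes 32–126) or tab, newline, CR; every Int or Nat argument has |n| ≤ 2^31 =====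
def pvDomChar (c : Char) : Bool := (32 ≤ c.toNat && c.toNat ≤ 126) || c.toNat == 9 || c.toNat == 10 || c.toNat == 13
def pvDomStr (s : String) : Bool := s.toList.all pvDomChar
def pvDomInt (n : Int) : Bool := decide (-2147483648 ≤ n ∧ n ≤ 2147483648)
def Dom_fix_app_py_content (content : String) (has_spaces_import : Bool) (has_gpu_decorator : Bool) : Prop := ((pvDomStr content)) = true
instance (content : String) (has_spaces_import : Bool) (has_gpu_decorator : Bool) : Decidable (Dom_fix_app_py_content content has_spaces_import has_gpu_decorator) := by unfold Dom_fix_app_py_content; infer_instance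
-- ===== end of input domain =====

-- B fuses A's two rebuild passes (import insertion, then decorator re-scan) into one linear pass; same return value, objective: alternative/simpler traversal.

-- ===== PORT A =====
-- shared predicates, read off the Python tests verbatim
def pvIsImport (line : String) : Bool :=
  PySem.Str.startswith (PySem.Str.strip line) "import " ||
  PySem.Str.startswith (PySem.Str.strip line) "from "

def pvNeedsGPU (line : String) : Bool :=
  PySem.Str.startswith (PySem.Str.strip line) "def " &&
    (PySem.Str.isIn "predict" line || PySem.Str.isIn "generate" line ||
     PySem.Str.isIn "inference" line || PySem.Str.isIn "process" line)

-- lines[i+1] is guarded by 'i + 1 >= len(lines) or …', so pyGetD's default is never the decider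
def pvStepA (lines : List String) (st : List String × Bool) (p : Int × String) :
    List String × Bool :=
  let fixed_lines := st.1 ++ [p.2]
  if pvIsImport p.2 then
    if p.1 + 1 ≥ PySem.List.len lines ||
        !(pvIsImport (PySem.List.pyGetD lines (p.1 + 1) "")) then
      if !st.2 then (fixed_lines ++ ["import spaces"], true) else (fixed_lines, st.2)
    else (fixed_lines, st.2)
  else (fixed_lines, st.2)

def fix_app_py_content (content : String) (has_spaces_import : Bool)
    (has_gpu_decorator : Bool) : String :=
  let lines := (PySem.Str.split? content "\n").getD []   -- sep "\n" ≠ "", split? is always some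
  let lines :=
    if !has_spaces_import then
      let st := (PySem.List.enumerate lines).foldl (pvStepA lines) ([], false)
      if !st.2 then "import spaces" :: st.1 else st.1    -- fixed_lines.insert(0, …)
    else lines
  let fixed_lines :=
    if !has_gpu_decorator then
      (PySem.List.enumerate lines).foldl
        (fun acc p =>
          if pvNeedsGPU p.2 then acc ++ ["@spaces.GPU", p.2] else acc ++ [p.2]) []
    else lines
  PySem.Str.join "\n" fixed_lines

-- ===== PORT B =====
def pvStepB (lines : List String) (has_spaces_import has_gpu_decorator : Bool)
    (st : List String × Bool) (p : Int × String) : List String × Bool :=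
  let out := if !has_gpu_decorator && pvNeedsGPU p.2 then st.1 ++ ["@spaces.GPU"] else st.1
  let out := out ++ [p.2]
  if !has_spaces_import && !st.2 && pvIsImport p.2 &&
      (p.1 + 1 ≥ PySem.List.len lines ||
        !(pvIsImport (PySem.List.pyGetD lines (p.1 + 1) ""))) then
    (out ++ ["import spaces"], true)
  else (out, st.2)

def fix_app_py_content_alt (content : String) (has_spaces_import : Bool)
    (has_gpu_decorator : Bool) : String :=
  let lines := (PySem.Str.split? content "\n").getD []
  let st := (PySem.List.enumerate lines).foldl
      (pvStepB lines has_spaces_import has_gpu_decorator) ([], false)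
  let out := if !has_spaces_import && !st.2 then "import spaces" :: st.1 else st.1
  PySem.Str.join "\n" out

-- ===== PRECONDITION & SPEC =====
def Spec_fix_app_py_content (content : String) (has_spaces_import : Bool) (has_gpu_decorator : Bool) (out : String) : Prop := out = fix_app_py_content_alt content has_spaces_import has_gpu_decorator
instance (content : String) (has_spaces_import : Bool) (has_gpu_decorator : Bool) (out : String) : Decidable (Spec_fix_app_py_content content has_spaces_import has_gpu_decorator out) := by unfold Spec_fix_app_py_content; infer_instance

-- ===== CLAIM (what is proved, stated in full; the proofs are below) =====
def Claim_equal_fix_app_py_content : Prop := ∀ (content : String) (has_spaces_import : Bool) (has_gpu_decorator : Bool), Dom_fix_app_py_content content has_spaces_import has_gpu_decorator → Spec_fix_app_py_content content has_spaces_import has_gpu_decorator (fix_app_py_content content has_spaces_import has_gpu_decorator)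

-- ===== LEMMAS AND PROOFS =====

-- what one line of the original contributes to the final output
def pvEmit (hgd : Bool) (line : String) : List String :=
  if !hgd && pvNeedsGPU line then ["@spaces.GPU", line] else [line]

theorem pvNeedsGPU_import_spaces : pvNeedsGPU "import spaces" = false := by decide

theorem pvEmit_import_spaces (hgd : Bool) : pvEmit hgd "import spaces" = ["import spaces"] := by
  cases hgd <;> decide

theorem pvEmit_true (l : List String) : l.flatMap (pvEmit true) = l := by
  induction l with
  | nil => rfl
  | cons x t ih => simp [pvEmit, ih]

-- A's second pass is the flatMap of pvEmit
theorem pass2_eq (l : List String) (j : Int) (acc : List String) :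
    (PySem.List.enumerate l j).foldl
      (fun acc p =>
        if pvNeedsGPU p.2 then acc ++ ["@spaces.GPU", p.2] else acc ++ [p.2]) acc
    = acc ++ l.flatMap (pvEmit false) := by
  induction l generalizing j acc with
  | nil => simp [PySem.List.enumerate_nil]
  | cons x t ih =>
    simp only [PySem.List.enumerate_cons, List.foldl_cons, List.flatMap_cons]
    by_cases h : pvNeedsGPU x = true <;>
      simp [h, ih, pvEmit, List.append_assoc]

-- B's fold with the import machinery disabled (has_spaces_import = true)
theorem Bfold_hsi_true (lines : List String) (hgd : Bool) (l : List String) (j : Int)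
    (acc : List String) (b : Bool) :
    (PySem.List.enumerate l j).foldl (pvStepB lines true hgd) (acc, b)
    = (acc ++ l.flatMap (pvEmit hgd), b) := by
  induction l generalizing j acc with
  | nil => simp [PySem.List.enumerate_nil]
  | cons x t ih =>
    simp only [PySem.List.enumerate_cons, List.foldl_cons, List.flatMap_cons]
    have : pvStepB lines true hgd (acc, b) (j, x) = (acc ++ pvEmit hgd x, b) := by
      unfold pvStepB pvEmit
      cases hgd <;> by_cases hg : pvNeedsGPU x = true <;> simp [hg]
    rw [this, ih, List.append_assoc]

-- core correspondence when imports are being inserted (has_spaces_import = false)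
theorem Bfold_hsi_false (lines : List String) (hgd : Bool) (l : List String) (j : Int)
    (accA : List String) (b : Bool) :
    (PySem.List.enumerate l j).foldl (pvStepB lines false hgd)
        (accA.flatMap (pvEmit hgd), b)
    = ((((PySem.List.enumerate l j).foldl (pvStepA lines) (accA, b)).1).flatMap (pvEmit hgd),
       ((PySem.List.enumerate l j).foldl (pvStepA lines) (accA, b)).2) := by
  induction l generalizing j accA b with
  | nil => simp [PySem.List.enumerate_nil]
  | cons x t ih =>
    simp only [PySem.List.enumerate_cons, List.foldl_cons]
    have hstep :
        pvStepB lines false hgd (accA.flatMap (pvEmit hgd), b) (j, x)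
        = ((pvStepA lines (accA, b) (j, x)).1.flatMap (pvEmit hgd),
           (pvStepA lines (accA, b) (j, x)).2) := by
      unfold pvStepA pvStepB
      by_cases h1 : pvIsImport x = true <;>
        by_cases h2 : (j + 1 ≥ PySem.List.len lines ||
            !(pvIsImport (PySem.List.pyGetD lines (j + 1) ""))) = true <;>
        cases b <;>
        · simp only [h1, h2, pvEmit]
          cases hgd <;> by_cases hg : pvNeedsGPU x = true <;>
            simp [hg, h1, h2, List.flatMap_append, pvEmit, pvEmit_import_spaces,
              pvNeedsGPU_import_spaces, List.append_assoc]
    rw [hstep, ih]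

theorem fix_app_py_content_eq (content : String) (hsi hgd : Bool) :
    fix_app_py_content content hsi hgd = fix_app_py_content_alt content hsi hgd := by
  unfold fix_app_py_content fix_app_py_content_alt
  set lines := (PySem.Str.split? content "\n").getD [] with hlines
  cases hsi with
  | true =>
    simp only [Bool.not_true, Bool.false_eq_true, if_neg, reduceIte]
    rw [Bfold_hsi_true lines hgd lines 0 [] false]
    cases hgd with
    | false => rw [pass2_eq lines 0 []]; simp
    | true => simp [pvEmit_true]
  | false =>
    simp only [Bool.not_false, reduceIte]
    have := Bfold_hsi_false lines hgd lines 0 [] false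
    simp only [List.flatMap_nil] at this
    rw [this]
    set stA := (PySem.List.enumerate lines 0).foldl (pvStepA lines) ([], false) with hstA
    cases h2 : stA.2 with
    | true =>
      simp only [Bool.not_true, Bool.false_eq_true, reduceIte, Bool.and_false]
      cases hgd with
      | false => rw [pass2_eq _ 0 []]; simp
      | true => simp [pvEmit_true]
    | false =>
      simp only [Bool.not_false, reduceIte, Bool.and_true]
      cases hgd with
      | false =>
        rw [pass2_eq _ 0 []]
        simp [List.flatMap_cons, pvEmit_import_spaces]
      | true => simp [pvEmit_true]

-- ===== VERDICT (by name: the statement is the Claim_ definition above) =====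
theorem fix_app_py_content_spec : Claim_equal_fix_app_py_content := by
  intro content hsi hgd _
  unfold Spec_fix_app_py_content
  exact fix_app_py_content_eq content hsi hgd
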